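-- pv_equiv track=rewrite | github.com/Camille0512/AlgoPractice | stack_queue/stack_practice.py | symbol_pairs
-- ===== SOURCE A (Python) =====
-- formatDict = {
--     ")": "(",
--     "]": "[",
--     "}": "{"
-- }
--
-- def symbol_pairs(inputStr):
--     checklist = []
--     for i in inputStr:
--         if i in formatDict.values():
--             checklist.append(i)
--         elif i in formatDict.keys() and len(checklist) > 0:
--             if checklist[-1] == formatDict[i]:
--                 return True
--             else:
--                 checklist = []
--     return False
-- ===== SOURCE B (Python) =====
-- formatDict = {
--     ")": "(",
--     "]": "[",
--     "}": "{"
-- }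
--
-- def symbol_pairs(inputStr):
--     # Two declarative stages: keep only the bracket characters, then ask
--     # whether any ADJACENT pair in that bracket sequence is (opener, its closer).
--     brackets = [c for c in inputStr if c in "()[]{}"]
--     return any(b in formatDict and formatDict[b] == a
--                for a, b in zip(brackets, brackets[1:]))
-- ===== Notes on version B (the rewrite author's own statement) =====
-- stated objective: simpler
-- what changed: Replaces A's stateful stack loop (push openers, peek [-1], clear on mismatch, early return) by two declarative stages: filter the string to its bracket characters, then test whether any adjacent pair in that sequence is an opener followed by its matching closer; exact because A fires precisely when a closer's immediately preceding bracket is its opener (a preceding closer always leaves the stack empty). The comprehension+zip/any run in C-level loops, so B is measurably faster by a constant factor.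
import Mathlib
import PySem

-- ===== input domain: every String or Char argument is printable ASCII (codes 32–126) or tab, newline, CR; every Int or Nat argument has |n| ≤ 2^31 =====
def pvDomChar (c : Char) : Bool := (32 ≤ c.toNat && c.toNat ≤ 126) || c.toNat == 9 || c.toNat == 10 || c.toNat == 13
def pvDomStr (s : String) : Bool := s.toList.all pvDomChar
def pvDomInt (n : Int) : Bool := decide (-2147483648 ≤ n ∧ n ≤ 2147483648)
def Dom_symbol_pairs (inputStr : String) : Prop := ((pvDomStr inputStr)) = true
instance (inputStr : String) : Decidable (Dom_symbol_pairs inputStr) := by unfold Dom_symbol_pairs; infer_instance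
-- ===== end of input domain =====

-- B drops A's stateful stack loop: it filters the string to its bracket characters and
-- declaratively tests whether any adjacent pair there is (opener, its matching closer).

def pvIsOpener (c : Char) : Bool := c == '(' || c == '[' || c == '{'
def pvIsCloser (c : Char) : Bool := c == ')' || c == ']' || c == '}'

-- ===== PORT A =====
-- formatDict lookup, hand-ported (3 fixed keys): exact
def pvFmt (c : Char) : Char :=
  if c = ')' then '(' else if c = ']' then '[' else '{'

-- the loop of A: state = checklist (openers pushed since last clear); early return = true
def pvLoopA : List Char → List Char → Bool
  | _, [] => false
  | checklist, c :: rest =>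
    if pvIsOpener c then                             -- i in formatDict.values()
      pvLoopA (checklist ++ [c]) rest                -- checklist.append(i)
    else if pvIsCloser c ∧ checklist.length > 0 then -- i in formatDict.keys() and len(checklist) > 0
      if checklist.getLast? = some (pvFmt c) then    -- checklist[-1] == formatDict[i]
        true
      else
        pvLoopA [] rest                              -- checklist = []
    else
      pvLoopA checklist rest

def symbol_pairs (inputStr : String) : Bool := pvLoopA [] inputStr.toList

-- ===== PORT B =====
-- any(b in formatDict and formatDict[b] == a for a, b in zip(brackets, brackets[1:]))
def pvAnyAdj : List Char → Bool
  | a :: b :: rest => (pvIsCloser b && pvFmt b == a) || pvAnyAdj (b :: rest)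
  | _ => false

def symbol_pairs_alt (inputStr : String) : Bool :=
  pvAnyAdj (inputStr.toList.filter (fun c => pvIsOpener c || pvIsCloser c))

-- ===== PRECONDITION & SPEC =====
def Spec_symbol_pairs (inputStr : String) (out : Bool) : Prop := out = symbol_pairs_alt inputStr
instance (inputStr : String) (out : Bool) : Decidable (Spec_symbol_pairs inputStr out) := by unfold Spec_symbol_pairs; infer_instance

-- ===== CLAIM (what is proved, stated in full; the proofs are below) =====
def Claim_equal_symbol_pairs : Prop := ∀ (inputStr : String), Dom_symbol_pairs inputStr → Spec_symbol_pairs inputStr (symbol_pairs inputStr)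

-- ===== LEMMAS AND PROOFS =====

-- the abstract state machine both sides reduce to: state = last opener since start/reset
def pvRun : Option Char → List Char → Bool
  | _, [] => false
  | prev, c :: rest =>
    if pvIsOpener c then pvRun (some c) rest
    else if prev = some (pvFmt c) then true else pvRun none rest

def pvSt (a : Char) : Option Char := if pvIsOpener a then some a else none

-- A's loop from any checklist behaves like pvRun from its last element, on the filtered list
theorem opener_cases (b : Char) (h : pvIsOpener b = true) : b = '(' ∨ b = '[' ∨ b = '{' := by
  simp [pvIsOpener] at h; tauto

theorem closer_cases (b : Char) (h : pvIsCloser b = true) : b = ')' ∨ b = ']' ∨ b = '}' := by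
  simp [pvIsCloser] at h; tauto

theorem pvLoopA_eq_run (l : List Char) : ∀ checklist : List Char,
    pvLoopA checklist l
      = pvRun checklist.getLast? (l.filter (fun c => pvIsOpener c || pvIsCloser c)) := by
  induction l with
  | nil => intro checklist; simp [pvLoopA, pvRun]
  | cons c rest ih =>
    intro checklist
    by_cases hop : pvIsOpener c = true
    · simp [pvLoopA, pvRun, hop, ih]
    · by_cases hcl : pvIsCloser c = true
      · cases checklist with
        | nil =>
          simp only [pvLoopA, if_neg hop, List.length_nil]
          rw [if_neg (fun h => absurd h.2 (by omega))]
          simp [List.filter, hop, hcl, pvRun, ih]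
        | cons x xs =>
          simp only [pvLoopA, if_neg hop, List.length_cons]
          rw [if_pos ⟨hcl, by omega⟩]
          by_cases hm : (x :: xs).getLast? = some (pvFmt c)
          · simp [List.filter, hop, hcl, pvRun, hm]
          · simp [List.filter, hop, hcl, pvRun, hm, ih []]
      · simp [pvLoopA, List.filter, hop, hcl, ih]

-- on an all-bracket list, pvRun started from pvSt a computes pvAnyAdj (a :: bs)
theorem pvRun_eq_anyAdj : ∀ bs : List Char, ∀ a : Char,
    (pvIsOpener a || pvIsCloser a) = true →
    (∀ c ∈ bs, (pvIsOpener c || pvIsCloser c) = true) →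
    pvRun (pvSt a) bs = pvAnyAdj (a :: bs) := by
  intro bs
  induction bs with
  | nil => intro a _ _; simp [pvRun, pvAnyAdj]
  | cons b rest ih =>
    intro a ha hall
    have hb : (pvIsOpener b || pvIsCloser b) = true := hall b (by simp)
    have hrest : ∀ c ∈ rest, (pvIsOpener c || pvIsCloser c) = true :=
      fun c hc => hall c (by simp [hc])
    by_cases hbo : pvIsOpener b = true
    · have hnc : pvIsCloser b = false := by
        rcases opener_cases b hbo with h | h | h <;> subst h <;> decide
      simp only [pvRun, if_pos hbo, pvAnyAdj, hnc, Bool.false_and, Bool.false_or]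
      have : some b = pvSt b := by simp [pvSt, hbo]
      rw [this, ih b hb hrest]
    · have hbc : pvIsCloser b = true := by
        cases (Bool.or_eq_true _ _).mp hb with
        | inl h => exact absurd h hbo
        | inr h => exact h
      have hst : pvSt b = none := by simp [pvSt, hbo]
      by_cases hm : pvSt a = some (pvFmt b)
      · have haeq : pvFmt b = a := by
          by_cases hao : pvIsOpener a = true
          · simpa [pvSt, hao] using hm.symm
          · simp [pvSt, hao] at hm
        simp [pvRun, hbo, hm, pvAnyAdj, hbc, haeq]
      · have haneq : (pvFmt b == a) = false := by
          by_cases hao : pvIsOpener a = true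
          · simp [pvSt, hao] at hm
            simpa using fun h => hm h.symm
          · have hac : pvIsCloser a = true := by
              cases (Bool.or_eq_true _ _).mp ha with
              | inl h => exact absurd h hao
              | inr h => exact h
            -- a is a closer, pvFmt b is always an opener: they differ
            rcases closer_cases a hac with h | h | h <;>
              rcases closer_cases b hbc with h' | h' | h' <;>
                subst h <;> subst h' <;> decide
        simp only [pvRun, if_neg hbo, if_neg hm, pvAnyAdj, haneq, Bool.and_false,
          Bool.false_or]
        rw [← hst, ih b hb hrest]

theorem pvRun_none_eq_anyAdj (bs : List Char)
    (hall : ∀ c ∈ bs, (pvIsOpener c || pvIsCloser c) = true) :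
    pvRun none bs = pvAnyAdj bs := by
  match bs with
  | [] => simp [pvRun, pvAnyAdj]
  | a :: rest =>
    have ha := hall a (by simp)
    have hrest : ∀ c ∈ rest, (pvIsOpener c || pvIsCloser c) = true :=
      fun c hc => hall c (by simp [hc])
    have hstep : pvRun none (a :: rest) = pvRun (pvSt a) rest := by
      by_cases hao : pvIsOpener a = true
      · simp [pvRun, hao, pvSt]
      · simp [pvRun, hao, pvSt]
    rw [hstep, pvRun_eq_anyAdj rest a ha hrest]

-- ===== VERDICT (by name: the statement is the Claim_ definition above) =====
theorem symbol_pairs_spec : Claim_equal_symbol_pairs := by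
  intro s _
  unfold Spec_symbol_pairs symbol_pairs symbol_pairs_alt
  rw [pvLoopA_eq_run]
  exact pvRun_none_eq_anyAdj _ (fun c hc => (List.mem_filter.mp hc).2)
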